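-- pv_equiv track=rewrite | github.com/vichye-1/Algorithm | Python/BOJ/20000/24416_알고리즘 수업 - 피보나치 수 1.py | dp
-- ===== SOURCE A (Python) =====
-- def dp(n):
--     fib = [0] * (n + 1)
--     fib[1] = 1
--     fib[2] = 1
--     count = 0
--     for i in range(3, n + 1):
--         count += 1
--         fib[i] = fib[i - 2] + fib[i - 1]
--     return count
-- ===== SOURCE B (Python) =====
-- def dp(n):
--     # closed form: the loop runs once per i in range(3, n+1)
--     return n - 2
-- ===== Notes on version B (the rewrite author's own statement) =====
-- stated objective: faster
-- what changed: Replaces the O(n) Fibonacci-table loop (which only counts its own iterations) with the closed form n - 2.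
import Mathlib
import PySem

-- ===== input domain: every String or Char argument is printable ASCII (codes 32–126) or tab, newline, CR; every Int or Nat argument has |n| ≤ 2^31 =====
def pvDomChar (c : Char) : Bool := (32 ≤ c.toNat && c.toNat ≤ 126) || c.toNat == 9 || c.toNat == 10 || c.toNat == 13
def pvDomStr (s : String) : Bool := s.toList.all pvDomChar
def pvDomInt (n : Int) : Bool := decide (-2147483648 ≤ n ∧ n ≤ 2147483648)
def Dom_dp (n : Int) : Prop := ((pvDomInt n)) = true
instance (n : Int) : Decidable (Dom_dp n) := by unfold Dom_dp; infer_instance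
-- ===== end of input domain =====

-- B replaces A's O(n) Fibonacci-table loop (which only counts its iterations) with the closed form n - 2 (faster).

-- ===== PORT A =====
-- fib indexing/assignment is in range for all indices the loop touches under Pre_dp (n ≥ 2),
-- where pyGetD/pySetD are exact for Python's fib[i] / fib[i] = v.
def dp (n : Int) : Int :=
  let fib := List.replicate (n + 1).toNat 0
  let fib := PySem.List.pySetD fib 1 1
  let fib := PySem.List.pySetD fib 2 1
  let st := (PySem.List.pyRange 3 (n + 1) 1).foldl
    (fun (s : List Int × Int) i =>
      let count := s.2 + 1
      let v := PySem.List.pyGetD s.1 (i - 2) 0 + PySem.List.pyGetD s.1 (i - 1) 0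
      (PySem.List.pySetD s.1 i v, count)) (fib, 0)
  st.2

-- ===== PORT B =====
def dp_alt (n : Int) : Int := n - 2

-- ===== PRECONDITION & SPEC =====
-- Pre_dp excludes n ≤ 1, where A raises IndexError on fib[1] = 1 / fib[2] = 1.
def Pre_dp (n : Int) : Prop := 2 ≤ n
instance (n : Int) : Decidable (Pre_dp n) := by unfold Pre_dp; infer_instance
def pvWitness_dp : Int := (5)
def Spec_dp (n : Int) (out : Int) : Prop := out = dp_alt n
instance (n : Int) (out : Int) : Decidable (Spec_dp n out) := by unfold Spec_dp; infer_instance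

-- ===== CLAIM (what is proved, stated in full; the proofs are below) =====
def Claim_equal_dp : Prop := ∀ (n : Int), Dom_dp n → Pre_dp n → Spec_dp n (dp n)

-- ===== LEMMAS AND PROOFS =====

-- the count component of A's loop just adds the number of iterations
theorem dp_count_foldl (f : List Int × Int → Int → List Int)
    (l : List Int) (s : List Int × Int) :
    (l.foldl (fun s i => (f s i, s.2 + 1)) s).2 = s.2 + l.length := by
  induction l generalizing s with
  | nil => simp
  | cons x xs ih => simp [List.foldl, ih]; omega

-- ===== VERDICT (by name: the statement is the Claim_ definition above) =====
theorem dp_spec : Claim_equal_dp := by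
  intro n _ hpre
  unfold Spec_dp dp dp_alt
  have h := dp_count_foldl
    (fun (s : List Int × Int) i =>
      PySem.List.pySetD s.1 i
        (PySem.List.pyGetD s.1 (i - 2) 0 + PySem.List.pyGetD s.1 (i - 1) 0))
    (PySem.List.pyRange 3 (n + 1) 1)
    (PySem.List.pySetD (PySem.List.pySetD (List.replicate (n + 1).toNat 0) 1 1) 2 1, 0)
  simp only [] at h ⊢
  rw [h, PySem.List.length_pyRange_one]
  have h2 : Pre_dp n := hpre
  unfold Pre_dp at h2
  omega
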